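-- pv_equiv track=rewrite | github.com/Bato803/Data-Structure-Algorithm-Nano | P0/P0/Task1.py | count_unique_numbers
-- ===== SOURCE A (Python) =====
-- def count_unique_numbers(data, Hash):
--
--     if Hash is None:
--         Hash = {}
--
--     cnt = 0
--     for row in data:
--         if row[0] not in Hash:
--             Hash[row[0]] = 0
--             cnt += 1
--         if row[1] not in Hash:
--             Hash[row[1]] = 0
--             cnt += 1
--
--     return cnt, Hash
-- ===== SOURCE B (Python) =====
-- def count_unique_numbers(data, Hash):
--     if Hash is None:
--         Hash = {}
--     vals = [v for row in data for v in (row[0], row[1])]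
--     new = [v for v in dict.fromkeys(vals) if v not in Hash]
--     for v in new:
--         Hash[v] = 0
--     return len(new), Hash
-- ===== Notes on version B (the rewrite author's own statement) =====
-- stated objective: idiomatic
-- what changed: Instead of interleaving membership tests, inserts and a running counter inside the row loop, B flattens both columns into one list, computes the new keys in one shot with an ordered dedup (dict.fromkeys) filtered against the existing dict, bulk-inserts them and returns their count.
import Mathlib
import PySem

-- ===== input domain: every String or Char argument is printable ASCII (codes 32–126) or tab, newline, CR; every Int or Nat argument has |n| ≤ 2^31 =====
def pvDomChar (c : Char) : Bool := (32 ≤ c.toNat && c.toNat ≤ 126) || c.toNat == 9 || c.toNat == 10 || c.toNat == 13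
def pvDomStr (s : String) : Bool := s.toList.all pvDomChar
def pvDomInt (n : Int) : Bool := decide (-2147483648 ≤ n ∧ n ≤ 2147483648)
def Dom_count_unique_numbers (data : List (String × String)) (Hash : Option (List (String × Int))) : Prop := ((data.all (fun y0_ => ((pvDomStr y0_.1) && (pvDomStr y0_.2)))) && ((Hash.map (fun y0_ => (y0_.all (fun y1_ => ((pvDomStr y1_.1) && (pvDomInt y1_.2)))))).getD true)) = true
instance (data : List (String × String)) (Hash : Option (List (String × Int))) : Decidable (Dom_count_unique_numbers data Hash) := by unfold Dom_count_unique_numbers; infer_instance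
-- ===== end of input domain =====

-- B computes the set of new keys in one shot (ordered dedup of the flattened columns,
-- filtered against the existing dict) instead of A's interleaved test/insert/count loop;
-- both mutate the passed dict identically, so the proved return-value equality covers it.


-- ===== PORT A =====
def count_unique_numbers (data : List (String × String)) (Hash : Option (List (String × Int))) : Int × (List (String × Int)) :=
  let H0 : PySem.Dict String Int := PySem.Dict.ofList (Hash.getD [])
  let r := data.foldl (fun (s : Int × PySem.Dict String Int) row =>
      let s1 := if s.2.contains row.1 then s else (s.1 + 1, s.2.insert row.1 0)
      if s1.2.contains row.2 then s1 else (s1.1 + 1, s1.2.insert row.2 0)) (0, H0)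
  (r.1, r.2.items)

-- ===== PORT B =====
def count_unique_numbers_alt (data : List (String × String)) (Hash : Option (List (String × Int))) : Int × (List (String × Int)) :=
  let H0 : PySem.Dict String Int := PySem.Dict.ofList (Hash.getD [])
  let vals := data.flatMap (fun row => [row.1, row.2])
  let news := (PySem.List.dedup vals).filter (fun v => !(H0.contains v))
  let H1 := news.foldl (fun d v => d.insert v 0) H0
  ((news.length : Int), H1.items)

-- ===== PRECONDITION & SPEC =====
def Spec_count_unique_numbers (data : List (String × String)) (Hash : Option (List (String × Int))) (out : Int × (List (String × Int))) : Prop := out = count_unique_numbers_alt data Hash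
instance (data : List (String × String)) (Hash : Option (List (String × Int))) (out : Int × (List (String × Int))) : Decidable (Spec_count_unique_numbers data Hash out) := by unfold Spec_count_unique_numbers; infer_instance

-- ===== CLAIM (what is proved, stated in full; the proofs are below) =====
def Claim_equal_count_unique_numbers : Prop := ∀ (data : List (String × String)) (Hash : Option (List (String × Int))), Dom_count_unique_numbers data Hash → Spec_count_unique_numbers data Hash (count_unique_numbers data Hash)

-- ===== LEMMAS AND PROOFS =====

-- A's per-value step (A's loop body is stepV applied to row.1 then row.2).
def stepV (s : Int × PySem.Dict String Int) (v : String) : Int × PySem.Dict String Int :=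
  if s.2.contains v then s else (s.1 + 1, s.2.insert v 0)

-- the new keys A's loop discovers when run from dict d, in encounter order
def newOf (d : PySem.Dict String Int) : List String → List String
  | [] => []
  | v :: vs => if d.contains v then newOf d vs else v :: newOf (d.insert v 0) vs

lemma foldl_pairs_eq_flatMap (data : List (String × String)) (init : Int × PySem.Dict String Int) :
    data.foldl (fun s row => stepV (stepV s row.1) row.2) init
      = (data.flatMap (fun row => [row.1, row.2])).foldl stepV init := by
  induction data generalizing init with
  | nil => rfl
  | cons r t ih => simp [List.foldl_cons, List.flatMap_cons, ih]

lemma foldl_stepV_eq (vs : List String) :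
    ∀ (cnt : Int) (d : PySem.Dict String Int),
      vs.foldl stepV (cnt, d)
        = (cnt + (newOf d vs).length, (newOf d vs).foldl (fun d v => d.insert v 0) d) := by
  induction vs with
  | nil => intro cnt d; simp [newOf]
  | cons v t ih =>
    intro cnt d
    by_cases h : d.contains v
    · simp [List.foldl_cons, stepV, h, newOf, ih]
    · simp only [List.foldl_cons, stepV, h, if_neg, Bool.false_eq_true, not_false_iff,
        newOf, ih]
      simp [add_assoc]
      omega

-- PySem.Set.ofList from an arbitrary start: appends exactly the not-yet-present firsts
lemma foldl_add_eq_append_filter (vs : List String) :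
    ∀ (s : PySem.Set String),
      List.foldl PySem.Set.add s vs
        = s ++ (PySem.Set.ofList vs).filter (fun v => !(s.contains v)) := by
  induction vs with
  | nil => intro s; simp [PySem.Set.ofList]
  | cons v t ih =>
    intro s
    have hof : PySem.Set.ofList (v :: t)
        = v :: (PySem.Set.ofList t).filter (fun x => !(decide (x = v))) := by
      show List.foldl PySem.Set.add (PySem.Set.add PySem.Set.empty v) t = _
      rw [ih]
      simp [PySem.Set.add, PySem.Set.empty, PySem.Set.contains]
    rw [List.foldl_cons]
    by_cases h : PySem.Set.contains s v
    · have hmem : v ∈ s := by simpa [PySem.Set.contains] using h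
      have hadd : PySem.Set.add s v = s := by simp [PySem.Set.add, hmem]
      rw [hadd, ih, hof, List.filter_cons]
      simp only [h, Bool.not_true, Bool.false_eq_true, if_false]
      congr 1
      rw [List.filter_filter]
      apply List.filter_congr
      intro x hx
      by_cases hxv : x = v
      · subst hxv; simp [PySem.Set.contains, hmem]
      · simp [hxv]
    · have hmem : v ∉ s := by simpa [PySem.Set.contains] using h
      have hadd : PySem.Set.add s v = s ++ [v] := by simp [PySem.Set.add, hmem]
      rw [hadd, ih, hof, List.filter_cons]
      simp only [h, Bool.not_false, if_true]
      simp only [List.append_assoc, List.cons_append, List.nil_append]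
      congr 2
      rw [List.filter_filter]
      apply List.filter_congr
      intro x hx
      by_cases hxv : x = v
      · subst hxv; simp [PySem.Set.contains, hmem]
      · simp [PySem.Set.contains, hxv]

lemma dedup_cons (v : String) (t : List String) :
    PySem.List.dedup (v :: t)
      = v :: (PySem.List.dedup t).filter (fun x => !(decide (x = v))) := by
  show List.foldl PySem.Set.add (PySem.Set.add PySem.Set.empty v) t = _
  rw [foldl_add_eq_append_filter]
  simp [PySem.Set.add, PySem.Set.empty, PySem.Set.contains, PySem.List.dedup]

lemma filter_dedup_eq_newOf (vs : List String) :
    ∀ (d : PySem.Dict String Int),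
      (PySem.List.dedup vs).filter (fun v => !(d.contains v)) = newOf d vs := by
  induction vs with
  | nil => intro d; simp [PySem.List.dedup, PySem.Set.ofList, newOf]
  | cons v t ih =>
    intro d
    rw [dedup_cons, List.filter_cons]
    by_cases h : d.contains v
    · simp only [h, Bool.not_true, Bool.false_eq_true, if_false, newOf]
      rw [List.filter_filter, ← ih d]
      apply List.filter_congr
      intro x hx
      by_cases hxv : x = v
      · subst hxv; simp [h]
      · simp [hxv]
    · simp only [h, Bool.false_eq_true, Bool.not_false, if_true, newOf]
      congr 1
      rw [List.filter_filter, ← ih (d.insert v 0)]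
      apply List.filter_congr
      intro x hx
      rw [PySem.Dict.contains_insert]
      by_cases hxv : x = v
      · subst hxv; simp
      · simp [hxv]

-- ===== VERDICT (by name: the statement is the Claim_ definition above) =====
theorem count_unique_numbers_spec : Claim_equal_count_unique_numbers := by
  intro data Hash _
  show _ = _
  unfold count_unique_numbers count_unique_numbers_alt
  simp only []
  rw [show (fun (s : Int × PySem.Dict String Int) row =>
      let s1 := if s.2.contains row.1 then s else (s.1 + 1, s.2.insert row.1 0)
      if s1.2.contains row.2 then s1 else (s1.1 + 1, s1.2.insert row.2 0))
    = (fun s (row : String × String) => stepV (stepV s row.1) row.2) from rfl]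
  rw [foldl_pairs_eq_flatMap, foldl_stepV_eq,
      filter_dedup_eq_newOf]
  simp
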